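-- pv_equiv track=rewrite | github.com/l-austinsmith/WHY2 | why2_exp_nonabelian.py | make_dihedral_table
-- ===== SOURCE A (Python) =====
-- def make_dihedral_table(n):
--     """
--     D_n: dihedral group of order 2n (symmetries of regular n-gon).
--     Elements 0..n-1: rotations r^0..r^{n-1}
--     Elements n..2n-1: reflections s·r^0..s·r^{n-1}
--
--     Multiplication rules:
--       r^a * r^b     = r^{(a+b) mod n}
--       r^a * s·r^b   = s·r^{(b-a) mod n}
--       s·r^a * r^b   = s·r^{(a+b) mod n}
--       s·r^a * s·r^b = r^{(b-a) mod n}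
--     """
--     order = 2 * n
--     table = [[0] * order for _ in range(order)]
--     for a in range(order):
--         for b in range(order):
--             if a < n and b < n:
--                 # r^a * r^b = r^{(a+b) mod n}
--                 table[a][b] = (a + b) % n
--             elif a < n and b >= n:
--                 # r^a * s·r^{b-n} = s·r^{(b-n-a) mod n}
--                 table[a][b] = n + (b - n - a) % n
--             elif a >= n and b < n:
--                 # s·r^{a-n} * r^b = s·r^{(a-n+b) mod n}
--                 table[a][b] = n + (a - n + b) % n
--             else:
--                 # s·r^{a-n} * s·r^{b-n} = r^{(b-n-(a-n)) mod n} = r^{(b-a) mod n}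
--                 table[a][b] = (b - a) % n
--     return table
-- ===== SOURCE B (Python) =====
-- def make_dihedral_table(n):
--     """Build the table whole-row at a time from two base rows by cyclic
--     rotation (slice concatenation), instead of computing each cell:
--     R = rotations [0..n-1], S = reflections [n..2n-1]; the row of r^a is
--     R rotated left by a followed by S rotated right by a, and the row of
--     s*r^k is S rotated left by k followed by R rotated right by k."""
--     R = list(range(n))
--     S = list(range(n, 2 * n))
--     rows = []
--     for a in range(n):
--         rows.append(R[a:] + R[:a] + S[n - a:] + S[:n - a])
--     for k in range(n):
--         rows.append(S[k:] + S[:k] + R[n - k:] + R[:n - k])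
--     return rows
-- ===== Notes on version B (the rewrite author's own statement) =====
-- stated objective: faster
-- what changed: B never computes a cell: it builds the two base rows [0..n-1] and [n..2n-1] once and assembles each of the 2n rows whole as a concatenation of four slices (cyclic rotations of the base rows), replacing A's per-cell 4-way branch and modular arithmetic with bulk slice copies.
import Mathlib
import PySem

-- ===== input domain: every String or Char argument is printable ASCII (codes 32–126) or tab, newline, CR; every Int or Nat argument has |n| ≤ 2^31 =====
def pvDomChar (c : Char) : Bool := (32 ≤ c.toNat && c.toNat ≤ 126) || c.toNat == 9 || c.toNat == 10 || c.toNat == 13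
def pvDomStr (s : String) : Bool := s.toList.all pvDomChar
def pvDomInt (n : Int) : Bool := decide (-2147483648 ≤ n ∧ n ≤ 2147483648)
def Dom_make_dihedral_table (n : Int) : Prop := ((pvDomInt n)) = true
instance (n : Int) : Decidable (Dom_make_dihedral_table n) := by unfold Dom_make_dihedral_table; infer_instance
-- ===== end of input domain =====

-- B builds the table whole-row at a time: each row is a concatenation of slice
-- rotations of the two base rows [0..n-1] and [n..2n-1], with no per-cell arithmetic.

-- ===== PORT A =====
def make_dihedral_table (n : Int) : List (List Int) :=
  let order := 2 * n
  (PySem.List.pyRange 0 order 1).map (fun a =>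
    (PySem.List.pyRange 0 order 1).map (fun b =>
      if a < n ∧ b < n then PySem.Int.mod (a + b) n
      else if a < n ∧ b ≥ n then n + PySem.Int.mod (b - n - a) n
      else if a ≥ n ∧ b < n then n + PySem.Int.mod (a - n + b) n
      else PySem.Int.mod (b - a) n))

-- ===== PORT B =====
def make_dihedral_table_alt (n : Int) : List (List Int) :=
  let R := PySem.List.pyRange 0 n 1
  let S := PySem.List.pyRange n (2 * n) 1
  ((PySem.List.pyRange 0 n 1).map (fun a =>
      PySem.List.slice R (some a) none ++ PySem.List.slice R none (some a) ++
      PySem.List.slice S (some (n - a)) none ++ PySem.List.slice S none (some (n - a))))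
  ++ ((PySem.List.pyRange 0 n 1).map (fun k =>
      PySem.List.slice S (some k) none ++ PySem.List.slice S none (some k) ++
      PySem.List.slice R (some (n - k)) none ++ PySem.List.slice R none (some (n - k))))

-- ===== PRECONDITION & SPEC =====
def Spec_make_dihedral_table (n : Int) (out : List (List Int)) : Prop := out = make_dihedral_table_alt n
instance (n : Int) (out : List (List Int)) : Decidable (Spec_make_dihedral_table n out) := by unfold Spec_make_dihedral_table; infer_instance

-- ===== CLAIM (what is proved, stated in full; the proofs are below) =====
def Claim_equal_make_dihedral_table : Prop := ∀ (n : Int), Dom_make_dihedral_table n → Spec_make_dihedral_table n (make_dihedral_table n)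

-- ===== LEMMAS AND PROOFS =====

-- shifting a unit range
theorem shift_map (d a b : Int) :
    (PySem.List.pyRange a b 1).map (fun j => d + j) = PySem.List.pyRange (d + a) (d + b) 1 := by
  rw [PySem.List.pyRange_one, PySem.List.pyRange_one, List.map_map]
  rw [show (d + b) - (d + a) = b - a by ring]
  exact List.map_congr_left (fun k _ => by simp; ring)

-- the left-rotation of [m..m+n) by c, written as two slices, is the cyclic-shift map
theorem rot (m n c : Int) (hn : 0 < n) (hc : 0 ≤ c) (hcn : c ≤ n) :
    PySem.List.slice (PySem.List.pyRange m (m + n) 1) (some c) none ++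
      PySem.List.slice (PySem.List.pyRange m (m + n) 1) none (some c)
    = (PySem.List.pyRange 0 n 1).map (fun j => m + PySem.Int.mod (j + c) n) := by
  rw [PySem.List.slice_from _ hc, PySem.List.slice_to _ hc]
  have hsplit : PySem.List.pyRange m (m + n) 1
      = PySem.List.pyRange m (m + c) 1 ++ PySem.List.pyRange (m + c) (m + n) 1 :=
    PySem.List.pyRange_one_append _ _ _ (by omega) (by omega)
  have hlen : (PySem.List.pyRange m (m + c) 1).length = c.toNat := by
    rw [PySem.List.length_pyRange_one]; omega
  rw [hsplit, List.drop_left' hlen, List.take_left' hlen]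
  have hsplit2 : PySem.List.pyRange 0 n 1
      = PySem.List.pyRange 0 (n - c) 1 ++ PySem.List.pyRange (n - c) n 1 :=
    PySem.List.pyRange_one_append _ _ _ (by omega) (by omega)
  rw [hsplit2, List.map_append]
  congr 1
  · have h1 : ∀ j ∈ PySem.List.pyRange 0 (n - c) 1,
        m + PySem.Int.mod (j + c) n = (m + c) + j := by
      intro j hj; rw [PySem.List.mem_pyRange_one] at hj
      rw [PySem.Int.mod_eq_emod_of_pos hn, Int.emod_eq_of_lt (by omega) (by omega)]; ring
    rw [List.map_congr_left h1]
    simpa [show (m + c) + (n - c) = m + n by ring] using (shift_map (m + c) 0 (n - c)).symm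
  · have h2 : ∀ j ∈ PySem.List.pyRange (n - c) n 1,
        m + PySem.Int.mod (j + c) n = (m + c - n) + j := by
      intro j hj; rw [PySem.List.mem_pyRange_one] at hj
      have : PySem.Int.mod (j + c) n = j + c - n := by
        rw [PySem.Int.mod_eq_emod_of_pos hn]
        calc (j + c) % n = (j + c - n) % n := (Int.sub_emod_right (j + c) n).symm
          _ = j + c - n := Int.emod_eq_of_lt (by omega) (by omega)
      rw [this]; ring
    rw [List.map_congr_left h2]
    simpa [show (m + c - n) + (n - c) = m by ring, show (m + c - n) + n = m + c by ring]
      using (shift_map (m + c - n) (n - c) n).symm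

-- the second half of a 0..2n range is the first half shifted by n
theorem range_top_half (n : Int) (f : Int → α) :
    (PySem.List.pyRange n (2 * n) 1).map f
      = (PySem.List.pyRange 0 n 1).map (fun j => f (n + j)) := by
  have h := shift_map n 0 n
  rw [show n + (0 : Int) = n by ring] at h
  rw [show (2 : Int) * n = n + n by ring, ← h, List.map_map]
  rfl

-- mod is invariant under adding n
theorem mod_shift (n x : Int) (hn : 0 < n) :
    PySem.Int.mod (x + n) n = PySem.Int.mod x n := by
  rw [PySem.Int.mod_eq_emod_of_pos hn, PySem.Int.mod_eq_emod_of_pos hn]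
  calc (x + n) % n = (x + n * 1) % n := by ring_nf
    _ = x % n := Int.add_mul_emod_self_left x n 1

theorem make_dihedral_table_spec : Claim_equal_make_dihedral_table := by
  intro n _
  unfold Spec_make_dihedral_table make_dihedral_table make_dihedral_table_alt
  dsimp only
  rcases le_or_gt n 0 with hn | hn
  · rw [PySem.List.pyRange_one_eq_nil (by omega), PySem.List.pyRange_one_eq_nil (by omega)]
    simp
  · rw [PySem.List.pyRange_one_append 0 n (2 * n) (by omega) (by omega), List.map_append]
    congr 1
    · -- rotation rows
      refine List.map_congr_left ?_
      intro a ha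
      rw [PySem.List.mem_pyRange_one] at ha
      rw [List.map_append, List.append_assoc (PySem.List.slice (PySem.List.pyRange 0 n) (some a) ++ PySem.List.slice (PySem.List.pyRange 0 n) none (some a))]
      congr 1
      · -- r^a · r^b block
        have h1 : ∀ b ∈ PySem.List.pyRange 0 n 1,
            (if a < n ∧ b < n then PySem.Int.mod (a + b) n
              else if a < n ∧ b ≥ n then n + PySem.Int.mod (b - n - a) n
              else if a ≥ n ∧ b < n then n + PySem.Int.mod (a - n + b) n
              else PySem.Int.mod (b - a) n)
            = 0 + PySem.Int.mod (b + a) n := by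
          intro b hb; rw [PySem.List.mem_pyRange_one] at hb
          rw [if_pos ⟨ha.2, hb.2⟩, Int.add_comm a b, Int.zero_add]
        rw [List.map_congr_left h1, ← rot 0 n a hn ha.1 (by omega)]
        simp
      · -- r^a · s·r^j block
        rw [range_top_half]
        have h2 : ∀ j ∈ PySem.List.pyRange 0 n 1,
            (if a < n ∧ n + j < n then PySem.Int.mod (a + (n + j)) n
              else if a < n ∧ n + j ≥ n then n + PySem.Int.mod ((n + j) - n - a) n
              else if a ≥ n ∧ n + j < n then n + PySem.Int.mod (a - n + (n + j)) n
              else PySem.Int.mod ((n + j) - a) n)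
            = n + PySem.Int.mod (j + (n - a)) n := by
          intro j hj; rw [PySem.List.mem_pyRange_one] at hj
          rw [if_neg (by omega), if_pos ⟨ha.2, by omega⟩,
            show (n + j) - n - a = j - a by ring,
            show j + (n - a) = (j - a) + n by ring, mod_shift n (j - a) hn]
        rw [List.map_congr_left h2, ← rot n n (n - a) hn (by omega) (by omega)]
        rw [show n + n = 2 * n by ring]
    · -- reflection rows
      rw [range_top_half]
      refine List.map_congr_left ?_
      intro k hk
      rw [PySem.List.mem_pyRange_one] at hk
      rw [List.map_append, List.append_assoc (PySem.List.slice (PySem.List.pyRange n (2 * n)) (some k) ++ PySem.List.slice (PySem.List.pyRange n (2 * n)) none (some k))]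
      congr 1
      · -- s·r^k · r^b block
        have h3 : ∀ b ∈ PySem.List.pyRange 0 n 1,
            (if n + k < n ∧ b < n then PySem.Int.mod ((n + k) + b) n
              else if n + k < n ∧ b ≥ n then n + PySem.Int.mod (b - n - (n + k)) n
              else if n + k ≥ n ∧ b < n then n + PySem.Int.mod ((n + k) - n + b) n
              else PySem.Int.mod (b - (n + k)) n)
            = n + PySem.Int.mod (b + k) n := by
          intro b hb; rw [PySem.List.mem_pyRange_one] at hb
          rw [if_neg (by omega), if_neg (by omega), if_pos ⟨by omega, hb.2⟩,
            show (n + k) - n + b = b + k by ring]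
        rw [List.map_congr_left h3, ← rot n n k hn hk.1 (by omega)]
        rw [show n + n = 2 * n by ring]
      · -- s·r^k · s·r^j block
        rw [range_top_half]
        have h4 : ∀ j ∈ PySem.List.pyRange 0 n 1,
            (if n + k < n ∧ n + j < n then PySem.Int.mod ((n + k) + (n + j)) n
              else if n + k < n ∧ n + j ≥ n then n + PySem.Int.mod ((n + j) - n - (n + k)) n
              else if n + k ≥ n ∧ n + j < n then n + PySem.Int.mod ((n + k) - n + (n + j)) n
              else PySem.Int.mod ((n + j) - (n + k)) n)
            = 0 + PySem.Int.mod (j + (n - k)) n := by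
          intro j hj; rw [PySem.List.mem_pyRange_one] at hj
          rw [if_neg (by omega), if_neg (by omega), if_neg (by omega),
            show (n + j) - (n + k) = j - k by ring, Int.zero_add,
            show j + (n - k) = (j - k) + n by ring, mod_shift n (j - k) hn]
        rw [List.map_congr_left h4, ← rot 0 n (n - k) hn (by omega) (by omega)]
        simp
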